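-- pv_equiv track=rewrite | github.com/rodmhgl/dbu | teams-management/teams-operator/resources.py | sanitize_label_value
-- ===== SOURCE A (Python) =====
-- def sanitize_label_value(value: str) -> str:
--     """Sanitize a string to be a valid Kubernetes label value.
--
--     Label values must be <= 63 chars and match [a-z0-9A-Z]([a-z0-9A-Z._-]*[a-z0-9A-Z])?.
--     """
--     sanitized = value.lower()
--     sanitized = "".join(c if c.isalnum() else "-" for c in sanitized)
--     sanitized = "-".join(filter(None, sanitized.split("-")))
--     sanitized = sanitized.strip("-")
--     if len(sanitized) > 63:
--         sanitized = sanitized[:63].rstrip("-")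
--     return sanitized
-- ===== SOURCE B (Python) =====
-- def sanitize_label_value(value: str) -> str:
--     """Sanitize a string to be a valid Kubernetes label value (single-pass scan)."""
--     out = []
--     for c in value.lower():
--         if c.isalnum():
--             out.append(c)
--         elif out and out[-1] != '-':
--             out.append('-')
--     result = ''.join(out).rstrip('-')
--     if len(result) > 63:
--         result = result[:63].rstrip('-')
--     return result
-- ===== Notes on version B (the rewrite author's own statement) =====
-- stated objective: simpler
-- what changed: Replaces A's five-pass pipeline (lower, per-char map to '-', split on '-', filter empties, join, strip, truncate) by one stateful linear scan that emits alnum chars and at most one separating dash (never leading), followed by a single rstrip and the same truncation.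
import Mathlib
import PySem

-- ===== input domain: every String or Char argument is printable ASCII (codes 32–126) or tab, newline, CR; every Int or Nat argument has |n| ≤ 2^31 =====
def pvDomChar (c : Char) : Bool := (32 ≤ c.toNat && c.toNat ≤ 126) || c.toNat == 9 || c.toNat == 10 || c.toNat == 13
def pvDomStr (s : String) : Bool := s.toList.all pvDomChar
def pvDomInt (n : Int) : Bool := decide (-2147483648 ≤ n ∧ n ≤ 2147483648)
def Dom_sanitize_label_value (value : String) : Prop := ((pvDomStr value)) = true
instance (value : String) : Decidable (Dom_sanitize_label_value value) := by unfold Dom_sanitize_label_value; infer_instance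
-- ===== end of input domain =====

-- B replaces A's multi-pass pipeline (map to '-', split, filter, join, strip) by one stateful linear scan; objective: simpler, same cost.

-- shared helper: exact port of Python's s.rstrip('-') (drop trailing '-' characters); both sources call .rstrip('-') in the truncation branch
def pyRstripDash (s : List Char) : List Char :=
  (List.dropWhile (fun c => c == '-') s.reverse).reverse

-- ===== PORT A =====
def sanitize_label_value (value : String) : String :=
  let s1 := PySem.Chars.lower value.toList
  let s2 := s1.map (fun c => if PySem.Chars.isalnum c then c else '-')
  let s3 := PySem.Chars.join ['-'] ((PySem.Chars.splitOn s2 ['-']).filter (fun p => !p.isEmpty))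
  let s4 := PySem.Chars.stripChars s3 ['-']
  let s5 := if 63 < s4.length then pyRstripDash (PySem.List.slice s4 none (some (63 : Int))) else s4
  String.ofList s5

-- ===== PORT B =====
def sanitize_label_value_alt (value : String) : String :=
  let s := PySem.Chars.lower value.toList
  let out := s.foldl (fun acc c =>
      if PySem.Chars.isalnum c then acc ++ [c]
      else if acc ≠ [] ∧ acc.getLast? ≠ some '-' then acc ++ ['-'] else acc) []
  let result := pyRstripDash out
  let result := if 63 < result.length then pyRstripDash (PySem.List.slice result none (some (63 : Int))) else result
  String.ofList result

-- ===== PRECONDITION & SPEC =====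
def Spec_sanitize_label_value (value : String) (out : String) : Prop := out = sanitize_label_value_alt value
instance (value : String) (out : String) : Decidable (Spec_sanitize_label_value value out) := by unfold Spec_sanitize_label_value; infer_instance

-- ===== CLAIM (what is proved, stated in full; the proofs are below) =====
def Claim_equal_sanitize_label_value : Prop := ∀ (value : String), Dom_sanitize_label_value value → Spec_sanitize_label_value value (sanitize_label_value value)

-- ===== LEMMAS AND PROOFS =====

def splitD : List Char → List Char × List (List Char)
  | [] => ([], [])
  | c :: m =>
    let r := splitD m
    if c = '-' then ([], r.1 :: r.2) else (c :: r.1, r.2)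

theorem go_spec : ∀ (l : List Char) (fuel : Nat) (cur : List Char) (acc : List (List Char)),
    l.length ≤ fuel →
    PySem.Chars.splitOn.go ['-'] fuel l cur acc
      = acc.reverse ++ (cur.reverse ++ (splitD l).1) :: (splitD l).2 := by
  intro l
  induction l with
  | nil =>
    intro fuel cur acc _
    cases fuel <;> simp [PySem.Chars.splitOn.go, splitD]
  | cons c rest ih =>
    intro fuel cur acc hf
    cases fuel with
    | zero => simp at hf
    | succ f =>
      rw [PySem.Chars.splitOn.go]
      by_cases hc : c = '-'
      · subst hc
        have hp : List.isPrefixOf ['-'] ('-' :: rest) = true := by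
          simp [List.isPrefixOf]
        simp only [hp, if_true, List.length_cons, List.length_nil, Nat.zero_add, List.drop_succ_cons, List.drop_zero]
        rw [ih f [] ((cur.reverse) :: acc) (by simpa using Nat.le_of_succ_le_succ hf)]
        simp [splitD]
      · have hp : List.isPrefixOf ['-'] (c :: rest) = false := by
          simp [List.isPrefixOf]; exact fun h => absurd h.symm hc
        simp only [hp]
        rw [if_neg (by simp)]
        rw [ih f (c :: cur) acc (by simpa using Nat.le_of_succ_le_succ hf)]
        simp [splitD, hc]

theorem splitOn_eq (m : List Char) :
    PySem.Chars.splitOn m ['-'] = (splitD m).1 :: (splitD m).2 := by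
  unfold PySem.Chars.splitOn
  rw [go_spec m (m.length + 1) [] [] (Nat.le_succ _)]
  simp

def splitA : List Char → List Char × List (List Char)
  | [] => ([], [])
  | c :: m =>
    let r := splitA m
    if PySem.Chars.isalnum c then (c :: r.1, r.2) else ([], r.1 :: r.2)

theorem isalnum_ne_dash {c : Char} (h : PySem.Chars.isalnum c = true) : c ≠ '-' := by
  intro hc; subst hc; revert h; decide

theorem splitD_map (m : List Char) :
    splitD (m.map (fun c => if PySem.Chars.isalnum c then c else '-')) = splitA m := by
  induction m with
  | nil => rfl
  | cons c m ih =>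
    by_cases h : PySem.Chars.isalnum c = true
    · simp [splitD, splitA, h, ih, isalnum_ne_dash h]
    · simp [splitD, splitA, h, ih]

def joinD : List (List Char) → List Char
  | [] => []
  | [w] => w
  | w :: ws => w ++ '-' :: joinD ws

theorem join_eq_joinD (ws : List (List Char)) : PySem.Chars.join ['-'] ws = joinD ws := by
  induction ws with
  | nil => rfl
  | cons w ws ih =>
    cases ws with
    | nil => simp [PySem.Chars.join, joinD, List.intercalate]
    | cons v t =>
      simp [PySem.Chars.join, List.intercalate] at ih ⊢
      simp [joinD, ih]

theorem rstrip_cons_ne {c : Char} (hc : c ≠ '-') (l : List Char) :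
    pyRstripDash (c :: l) = c :: pyRstripDash l := by
  unfold pyRstripDash
  rw [List.reverse_cons, List.dropWhile_append]
  by_cases h : List.dropWhile (fun c => c == '-') l.reverse = []
  · simp [h, hc]
  · simp [h, List.isEmpty_iff]

theorem rstrip_cons_dash (l : List Char) :
    pyRstripDash ('-' :: l) = if pyRstripDash l = [] then [] else '-' :: pyRstripDash l := by
  unfold pyRstripDash
  rw [List.reverse_cons, List.dropWhile_append]
  by_cases h : List.dropWhile (fun c => c == '-') l.reverse = []
  · simp [h]
  · simp [h, List.isEmpty_iff]

def bRun : Bool → List Char → List Char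
  | _, [] => []
  | inWord, c :: m =>
    if PySem.Chars.isalnum c then c :: bRun true m
    else if inWord then '-' :: bRun false m else bRun false m

def NN : List Char → Bool := fun q => !q.isEmpty

theorem joinD_cons_cons (c : Char) (p : List Char) (qs : List (List Char)) :
    joinD ((c :: p) :: qs) = c :: joinD (p :: qs) := by
  cases qs <;> simp [joinD]

theorem joinD_nil_cons (qs : List (List Char)) :
    joinD ([] :: qs) = if qs = [] then [] else '-' :: joinD qs := by
  cases qs <;> simp [joinD]

theorem joinD_ne_nil (qs : List (List Char)) (hq : ∀ q ∈ qs, q ≠ []) (h : qs ≠ []) :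
    joinD qs ≠ [] := by
  cases qs with
  | nil => exact absurd rfl h
  | cons q t =>
    have hq1 : q ≠ [] := hq q (by simp)
    cases t <;> simp [joinD, hq1]

theorem mem_filter_NN_ne_nil {qs : List (List Char)} {q : List Char} (h : q ∈ qs.filter NN) : q ≠ [] := by
  have := (List.mem_filter.mp h).2
  simpa [NN, List.isEmpty_iff] using this

theorem bRun_rstrip (m : List Char) : ∀ b : Bool,
    pyRstripDash (bRun b m)
      = if b then joinD ((splitA m).1 :: (splitA m).2.filter NN)
        else joinD (((splitA m).1 :: (splitA m).2).filter NN) := by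
  induction m with
  | nil => intro b; cases b <;> simp [bRun, splitA, joinD, pyRstripDash, NN, List.filter]
  | cons c m ih =>
    intro b
    by_cases h : PySem.Chars.isalnum c = true
    · have hne := isalnum_ne_dash h
      simp only [bRun, h, if_true, splitA]
      rw [rstrip_cons_ne hne, ih true]
      cases b <;> simp [joinD_cons_cons, NN, List.filter]
    · simp only [bRun, h, if_false, splitA, Bool.false_eq_true]
      cases b with
      | false =>
        simp only [if_false, Bool.false_eq_true]
        rw [ih false]
        simp [NN, List.filter]
      | true =>
        simp only [if_true]
        rw [rstrip_cons_dash, ih false]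
        have hnn : ∀ q ∈ (((splitA m).1 :: (splitA m).2).filter NN), q ≠ [] :=
          fun q hq => mem_filter_NN_ne_nil hq
        have key : (joinD (((splitA m).1 :: (splitA m).2).filter NN) = [])
            ↔ (((splitA m).1 :: (splitA m).2).filter NN) = [] := by
          constructor
          · intro h1; by_contra he; exact joinD_ne_nil _ hnn he h1
          · intro h1; rw [h1]; rfl
        simp only [Bool.false_eq_true, if_false]
        rw [joinD_nil_cons]; simp only [key]

theorem foldl_eq_bRun (m : List Char) : ∀ acc : List Char,
    m.foldl (fun acc c =>
      if PySem.Chars.isalnum c then acc ++ [c]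
      else if acc ≠ [] ∧ acc.getLast? ≠ some '-' then acc ++ ['-'] else acc) acc
    = acc ++ bRun (decide (acc ≠ [] ∧ acc.getLast? ≠ some '-')) m := by
  induction m with
  | nil => intro acc; simp [bRun]
  | cons c m ih =>
    intro acc
    by_cases h : PySem.Chars.isalnum c = true
    · simp only [List.foldl_cons, h, if_true]
      rw [ih (acc ++ [c])]
      have h1 : (acc ++ [c]).getLast? = some c := by simp
      have h2 : decide ((acc ++ [c]) ≠ [] ∧ (acc ++ [c]).getLast? ≠ some '-') = true := by
        simp [h1, isalnum_ne_dash h]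
      rw [h2]
      by_cases hw : acc ≠ [] ∧ acc.getLast? ≠ some '-' <;> simp [bRun, h]
    · by_cases hw : acc ≠ [] ∧ acc.getLast? ≠ some '-'
      · simp only [List.foldl_cons, h, if_false, if_pos hw, Bool.false_eq_true]
        rw [ih (acc ++ ['-'])]
        have h2 : decide ((acc ++ ['-']) ≠ [] ∧ (acc ++ ['-']).getLast? ≠ some '-') = false := by
          simp
        rw [h2]
        simp [bRun, h, hw]
      · simp only [List.foldl_cons, h, if_false, if_neg hw, Bool.false_eq_true]
        rw [ih acc]
        have h2 : decide (acc ≠ [] ∧ acc.getLast? ≠ some '-') = false := by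
          simpa using hw
        rw [h2]
        simp [bRun, h]

theorem splitA_alnum (m : List Char) :
    (∀ ch ∈ (splitA m).1, PySem.Chars.isalnum ch = true) ∧
    (∀ q ∈ (splitA m).2, ∀ ch ∈ q, PySem.Chars.isalnum ch = true) := by
  induction m with
  | nil => simp [splitA]
  | cons c m ih =>
    by_cases h : PySem.Chars.isalnum c = true
    · simp only [splitA, h, if_true]
      refine ⟨?_, ih.2⟩
      intro ch hch
      rcases List.mem_cons.mp hch with rfl | hch
      · exact h
      · exact ih.1 ch hch
    · simp only [splitA, h, if_false, Bool.false_eq_true]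
      refine ⟨by simp, ?_⟩
      intro q hq
      rcases List.mem_cons.mp hq with rfl | hq
      · exact ih.1
      · exact ih.2 q hq

theorem joinD_rev_head (ws : List (List Char)) (hne : ∀ w ∈ ws, w ≠ [])
    (hal : ∀ w ∈ ws, ∀ ch ∈ w, PySem.Chars.isalnum ch = true) :
    joinD ws = [] ∨ ∃ d t, (joinD ws).reverse = d :: t ∧ PySem.Chars.isalnum d = true := by
  induction ws with
  | nil => exact Or.inl rfl
  | cons w ws ih =>
    cases ws with
    | nil =>
      right
      have hw : w ≠ [] := hne w (by simp)
      have : w.reverse ≠ [] := by simpa using hw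
      rcases List.exists_cons_of_ne_nil this with ⟨d, t, ht⟩
      refine ⟨d, t, by simpa [joinD] using ht, ?_⟩
      have : d ∈ w.reverse := by rw [ht]; simp
      exact hal w (by simp) d (List.mem_reverse.mp this)
    | cons v tl =>
      right
      have hih := ih (fun x hx => hne x (by simp [hx])) (fun x hx => hal x (by simp [hx]))
      have hnn : joinD (v :: tl) ≠ [] :=
        joinD_ne_nil _ (fun x hx => hne x (by simp [hx])) (by simp)
      rcases hih with h0 | ⟨d, t, ht, hd⟩
      · exact absurd h0 hnn
      · refine ⟨d, t ++ '-' :: w.reverse, ?_, hd⟩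
        show (joinD (w :: v :: tl)).reverse = _
        rw [show joinD (w :: v :: tl) = w ++ '-' :: joinD (v :: tl) from rfl]
        simp [ht]

theorem strip_id (ws : List (List Char)) (hne : ∀ w ∈ ws, w ≠ [])
    (hal : ∀ w ∈ ws, ∀ ch ∈ w, PySem.Chars.isalnum ch = true) :
    PySem.Chars.stripChars (joinD ws) ['-'] = joinD ws := by
  have hhead : joinD ws = [] ∨ ∃ d t, joinD ws = d :: t ∧ PySem.Chars.isalnum d = true := by
    cases ws with
    | nil => exact Or.inl rfl
    | cons w tl =>
      right
      have hw : w ≠ [] := hne w (by simp)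
      rcases List.exists_cons_of_ne_nil hw with ⟨d, w', rfl⟩
      have hd : PySem.Chars.isalnum d = true := hal (d :: w') (by simp) d (by simp)
      cases tl with
      | nil => exact ⟨d, w', rfl, hd⟩
      | cons v t => exact ⟨d, w' ++ '-' :: joinD (v :: t), rfl, hd⟩
  rcases hhead with h0 | ⟨d, t, hdt, hd⟩
  · simp [h0, PySem.Chars.stripChars]
  · rcases joinD_rev_head ws hne hal with h0 | ⟨e, r, her, he⟩
    · simp [h0, PySem.Chars.stripChars]
    · simp only [PySem.Chars.stripChars]
      rw [hdt]
      rw [List.dropWhile_cons, if_neg (by simp [isalnum_ne_dash hd])]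
      rw [← hdt, her]
      rw [List.dropWhile_cons, if_neg (by simp [isalnum_ne_dash he])]
      rw [← her, List.reverse_reverse]

def pvF : Char → Char := fun c => if PySem.Chars.isalnum c then c else '-'

theorem core (s1 : List Char) :
    PySem.Chars.stripChars
      (PySem.Chars.join ['-'] ((PySem.Chars.splitOn (s1.map pvF) ['-']).filter (fun p => !p.isEmpty))) ['-']
    = pyRstripDash (s1.foldl (fun acc c =>
        if PySem.Chars.isalnum c then acc ++ [c]
        else if acc ≠ [] ∧ acc.getLast? ≠ some '-' then acc ++ ['-'] else acc) []) := by
  have hws : ((PySem.Chars.splitOn (s1.map pvF) ['-']).filter (fun p => !p.isEmpty))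
      = ((splitA s1).1 :: (splitA s1).2).filter NN := by
    rw [splitOn_eq, show List.map pvF s1 = s1.map (fun c => if PySem.Chars.isalnum c then c else '-') from rfl, splitD_map]
    rfl
  rw [hws, join_eq_joinD]
  rw [strip_id _ (fun w hw => mem_filter_NN_ne_nil hw)
      (fun w hw ch hch => by
        have hmem := (List.mem_filter.mp hw).1
        rcases List.mem_cons.mp hmem with rfl | h2
        · exact (splitA_alnum s1).1 ch hch
        · exact (splitA_alnum s1).2 w h2 ch hch)]
  rw [foldl_eq_bRun s1 []]
  have : decide (([] : List Char) ≠ [] ∧ ([] : List Char).getLast? ≠ some '-') = false := by simp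
  rw [this]
  simp only [List.nil_append]
  rw [bRun_rstrip s1 false]
  simp

-- ===== VERDICT (by name: the statement is the Claim_ definition above) =====
theorem sanitize_label_value_spec : Claim_equal_sanitize_label_value := by
  intro value _
  unfold Spec_sanitize_label_value sanitize_label_value sanitize_label_value_alt
  dsimp only
  rw [show (fun c => if PySem.Chars.isalnum c then c else '-') = pvF from rfl, core]
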